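-- pv_equiv track=rewrite | github.com/nijel/translate | translate/filters/decoration.py | spacestart
-- ===== SOURCE A (Python) =====
-- def spacestart(str1):
--     """Returns all the whitespace from the start of the string."""
--     newstring = ""
--     for c in str1:
--         if c.isspace():
--             newstring += c
--         else:
--             break
--     return newstring
-- ===== SOURCE B (Python) =====
-- def spacestart(str1):
--     """Returns all the whitespace from the start of the string."""
--     return str1[:len(str1) - len(str1.lstrip())]
-- ===== Notes on version B (the rewrite author's own statement) =====
-- stated objective: simpler
-- what changed: Replaces the char-by-char accumulation loop with a closed-form slice: the leading-whitespace run length is len(str1) - len(str1.lstrip()).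
import Mathlib
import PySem

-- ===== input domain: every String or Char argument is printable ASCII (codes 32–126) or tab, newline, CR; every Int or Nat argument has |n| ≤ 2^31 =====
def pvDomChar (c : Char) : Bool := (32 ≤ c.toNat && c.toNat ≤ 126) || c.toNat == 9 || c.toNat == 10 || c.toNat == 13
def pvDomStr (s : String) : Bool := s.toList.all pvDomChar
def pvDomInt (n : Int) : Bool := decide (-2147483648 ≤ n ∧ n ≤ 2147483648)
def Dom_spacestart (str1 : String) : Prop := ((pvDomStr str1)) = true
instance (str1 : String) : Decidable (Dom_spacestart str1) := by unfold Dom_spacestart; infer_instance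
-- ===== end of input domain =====

-- B replaces A's char-by-char accumulation loop with a closed-form slice str1[:len(str1)-len(str1.lstrip())]; objective: simpler.


-- ===== PORT A =====
-- the 'for c in str1' loop with 'break': accumulate whitespace chars into newstring, stop at the first non-space
def spacestartGo (cs : List Char) (newstring : String) : String :=
  match cs with
  | [] => newstring
  | c :: rest => if PySem.Chars.isspace c then spacestartGo rest (newstring.push c) else newstring

def spacestart (str1 : String) : String := spacestartGo str1.toList ""

-- ===== PORT B =====
def spacestart_alt (str1 : String) : String :=
  PySem.Str.slice str1 none (some (PySem.Str.len str1 - PySem.Str.len (PySem.Str.lstrip str1)))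

-- ===== PRECONDITION & SPEC =====
def Spec_spacestart (str1 : String) (out : String) : Prop := out = spacestart_alt str1
instance (str1 : String) (out : String) : Decidable (Spec_spacestart str1 out) := by unfold Spec_spacestart; infer_instance

-- ===== CLAIM (what is proved, stated in full; the proofs are below) =====
def Claim_equal_spacestart : Prop := ∀ (str1 : String), Dom_spacestart str1 → Spec_spacestart str1 (spacestart str1)

-- ===== LEMMAS AND PROOFS =====
theorem spacestartGo_eq (cs : List Char) (acc : String) :
    (spacestartGo cs acc).toList = acc.toList ++ cs.takeWhile PySem.Chars.isspace := by
  induction cs generalizing acc with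
  | nil => simp [spacestartGo]
  | cons c rest ih =>
    simp only [spacestartGo, List.takeWhile]
    by_cases h : PySem.Chars.isspace c
    · simp [h, ih]
    · simp [h]

theorem spacestart_alt_toList (s : String) :
    (spacestart_alt s).toList = s.toList.takeWhile PySem.Chars.isspace := by
  unfold spacestart_alt
  have hlen : PySem.Str.len s - PySem.Str.len (PySem.Str.lstrip s)
      = ((s.toList.takeWhile PySem.Chars.isspace).length : Int) := by
    simp only [PySem.Str.len, PySem.Str.toList_lstrip, PySem.Chars.lstrip]
    have := List.takeWhile_append_dropWhile (p := PySem.Chars.isspace) (l := s.toList)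
    have hl : (s.toList.takeWhile PySem.Chars.isspace).length
        + (s.toList.dropWhile PySem.Chars.isspace).length = s.toList.length := by
      rw [← List.length_append, this]
    omega
  rw [hlen, PySem.Str.toList_slice, PySem.Chars.slice_eq_listSlice,
    PySem.List.slice_to_natCast]
  exact (List.prefix_iff_eq_take.mp (List.takeWhile_prefix _)).symm

-- ===== VERDICT (by name: the statement is the Claim_ definition above) =====
theorem spacestart_spec : Claim_equal_spacestart := by
  intro s _
  unfold Spec_spacestart spacestart
  apply String.toList_injective
  rw [spacestartGo_eq, spacestart_alt_toList]
  simp
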